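-- pv_equiv track=rewrite | github.com/zacanalplus/utubeex | src/python/firstdivs.py | first_divisors
-- ===== SOURCE A (Python) =====
-- def first_divisors(n : int) -> tuple:
--     n_me = (n, 1)
--     if(n < 2):
--         return (0, 0)
--     for div in range(2, 4):
--         numt = (n, div)
--         quotient, remainder = divmod(*numt)
--         if(remainder == 0):
--             return (div, quotient)
--
--     for div in range(5, n, 4):
--         if(div * div > n):
--             return n_me
--         numt = (n, div)
--         quotient, remainder = divmod(*numt)
--         if(remainder == 0):
--             return (div, quotient)
--         div += 2
--         numt = (n, div)
--         quotient, remainder = divmod(*numt)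
--         if(remainder == 0):
--             return (div, quotient)
--     return n_me
-- ===== SOURCE B (Python) =====
-- def first_divisors(n: int) -> tuple:
--     # Uniform trial division: one loop over every d with d*d <= n; prime -> (n, 1).
--     if n < 2:
--         return (0, 0)
--     d = 2
--     while d * d <= n:
--         if n % d == 0:
--             return (d, n // d)
--         d += 1
--     return (n, 1)
-- ===== Notes on version B (the rewrite author's own statement) =====
-- stated objective: simpler
-- what changed: Replaced A's special-cased small divisors plus a stepped range loop testing odd pairs with an in-loop sqrt early-exit by one uniform trial-division loop over every d with d*d <= n.
import Mathlib
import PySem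

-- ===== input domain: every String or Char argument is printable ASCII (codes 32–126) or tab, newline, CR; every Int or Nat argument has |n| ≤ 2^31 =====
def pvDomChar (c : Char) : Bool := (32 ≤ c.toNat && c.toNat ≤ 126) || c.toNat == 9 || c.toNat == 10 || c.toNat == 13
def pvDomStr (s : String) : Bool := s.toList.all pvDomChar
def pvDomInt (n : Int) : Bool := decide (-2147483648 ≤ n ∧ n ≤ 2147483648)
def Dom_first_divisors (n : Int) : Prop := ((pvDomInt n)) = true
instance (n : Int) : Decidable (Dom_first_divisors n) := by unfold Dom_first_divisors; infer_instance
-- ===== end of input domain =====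

-- B replaces A's special-casing of small divisors + stepped odd-pair loop with interleaved sqrt cutoff by one
-- uniform trial-division loop over every d with d*d <= n (simpler, not faster).

-- ===== PORT A =====
-- first for-loop: for div in range(2, 4): divmod(n, div), early return on remainder 0
def fdScan1 (n : Int) : List Int → Option (Int × Int)
  | [] => none
  | div :: rest =>
      -- quotient, remainder = divmod(n, div); div ≥ 2 here so divmod never raises
      if PySem.Int.mod n div = 0 then some (div, PySem.Int.floordiv n div)
      else fdScan1 n rest

-- second for-loop: for div in range(5, n, 4): sqrt cutoff, test div, then div + 2
def fdScan2 (n : Int) : List Int → Option (Int × Int)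
  | [] => none
  | div :: rest =>
      if div * div > n then some (n, 1)
      else if PySem.Int.mod n div = 0 then some (div, PySem.Int.floordiv n div)
      else if PySem.Int.mod n (div + 2) = 0 then some (div + 2, PySem.Int.floordiv n (div + 2))
      else fdScan2 n rest

def first_divisors (n : Int) : Int × Int :=
  if n < 2 then (0, 0)
  else
    match fdScan1 n (PySem.List.pyRange 2 4 1) with
    | some p => p
    | none =>
        match fdScan2 n (PySem.List.pyRange 5 n 4) with
        | some p => p
        | none => (n, 1)

-- ===== PORT B =====
-- while d * d <= n: if n % d == 0: return (d, n // d); d += 1 — then (n, 1)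
def fdTrial (n d : Int) : Int × Int :=
  if n < d * d then (n, 1)
  else if PySem.Int.mod n d = 0 then (d, PySem.Int.floordiv n d)
  else fdTrial n (d + 1)
termination_by (n + 2 - d).toNat
decreasing_by
  rename_i h _
  rw [not_lt] at h
  have hdn : d ≤ n := by nlinarith [mul_self_nonneg (d - 1)]
  omega

def first_divisors_alt (n : Int) : Int × Int :=
  if n < 2 then (0, 0)
  else fdTrial n 2

-- ===== PRECONDITION & SPEC =====
def Spec_first_divisors (n : Int) (out : Int × Int) : Prop := out = first_divisors_alt n
instance (n : Int) (out : Int × Int) : Decidable (Spec_first_divisors n out) := by unfold Spec_first_divisors; infer_instance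

-- ===== CLAIM (what is proved, stated in full; the proofs are below) =====
def Claim_equal_first_divisors : Prop := ∀ (n : Int), Dom_first_divisors n → Spec_first_divisors n (first_divisors n)

-- ===== LEMMAS AND PROOFS =====

-- the smallest divisor ≥ 2 of n, as an Int (= n's least prime factor)
def pInt (n : Int) : Int := ((n.toNat).minFac : Int)

theorem pInt_dvd (n : Int) (hn : 2 ≤ n) : pInt n ∣ n := by
  have h : (((n.toNat).minFac : Int)) ∣ ((n.toNat : Int)) :=
    Int.natCast_dvd_natCast.mpr (Nat.minFac_dvd n.toNat)
  rwa [Int.toNat_of_nonneg (by omega)] at h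

theorem pInt_two_le (n : Int) (hn : 2 ≤ n) : 2 ≤ pInt n := by
  have h1 : n.toNat ≠ 1 := by omega
  have := (Nat.minFac_prime h1).two_le
  unfold pInt; exact_mod_cast this

theorem pInt_le (n : Int) (hn : 2 ≤ n) : pInt n ≤ n := by
  have h : (((n.toNat).minFac : Int)) ≤ ((n.toNat : Int)) := by
    exact_mod_cast Nat.minFac_le (show 0 < n.toNat by omega)
  rwa [Int.toNat_of_nonneg (by omega)] at h

theorem pInt_min (n : Int) (hn : 2 ≤ n) {k : Int} (hk : 2 ≤ k) (hd : k ∣ n) : pInt n ≤ k := by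
  have hkd : k.toNat ∣ n.toNat := by
    rw [← Int.natCast_dvd_natCast,
        Int.toNat_of_nonneg (by omega : (0:Int) ≤ k), Int.toNat_of_nonneg (by omega : (0:Int) ≤ n)]
    exact hd
  have h2 : (((n.toNat).minFac : Int)) ≤ ((k.toNat : Int)) := by
    exact_mod_cast Nat.minFac_le_of_dvd (by omega) hkd
  rwa [Int.toNat_of_nonneg (by omega : (0:Int) ≤ k)] at h2

-- if nothing below d divides n and n ≤ d, then n is its own least divisor
theorem pInt_eq_self_of_le (n : Int) (hn : 2 ≤ n) {d : Int}
    (hmin : ∀ k, 2 ≤ k → k < d → ¬ k ∣ n) (hnd : n ≤ d) : pInt n = n := by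
  have h2 := pInt_two_le n hn
  have hle := pInt_le n hn
  by_contra hne
  exact hmin (pInt n) h2 (by omega) (pInt_dvd n hn)

-- if nothing below d divides n and d * d > n, then n is its own least divisor
theorem pInt_eq_self_of_sq (n : Int) (hn : 2 ≤ n) {d : Int} (hd : 0 ≤ d)
    (hmin : ∀ k, 2 ≤ k → k < d → ¬ k ∣ n) (hsq : n < d * d) : pInt n = n := by
  by_cases hp : Nat.Prime n.toNat
  · unfold pInt
    rw [hp.minFac_eq, Int.toNat_of_nonneg (by omega)]
  · have hsqle := Nat.minFac_sq_le_self (show 0 < n.toNat by omega) hp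
    have hcast : pInt n * pInt n ≤ n := by
      have h : (((n.toNat.minFac ^ 2 : Nat)) : Int) ≤ ((n.toNat : Int)) := by exact_mod_cast hsqle
      rw [Int.toNat_of_nonneg (by omega)] at h
      unfold pInt
      push_cast at h
      nlinarith [h]
    have h2 := pInt_two_le n hn
    have hlt : pInt n < d := by nlinarith
    exact absurd (pInt_dvd n hn) (hmin (pInt n) h2 hlt)

theorem pyRange_four_nil (a b : Int) (h : b ≤ a) : PySem.List.pyRange a b 4 = [] := by
  rw [PySem.List.pyRange_of_pos _ _ (by norm_num)]
  simp [show ¬ a < b by omega]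

theorem pyRange_four_cons (a b : Int) (h : a < b) :
    PySem.List.pyRange a b 4 = a :: PySem.List.pyRange (a + 4) b 4 := by
  rw [PySem.List.pyRange_of_pos _ _ (by norm_num), PySem.List.pyRange_of_pos _ _ (by norm_num)]
  by_cases h4 : a + 4 < b
  · have hN : ((b - a + 4 - 1) / 4).toNat = ((b - (a + 4) + 4 - 1) / 4).toNat + 1 := by omega
    rw [if_pos h, if_pos h4, hN, List.range_succ_eq_map]
    simp [List.map_map, Function.comp]
    intro k _
    ring
  · have hN : ((b - a + 4 - 1) / 4).toNat = 1 := by omega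
    rw [if_pos h, if_neg h4, hN]
    simp

-- the B-side loop computes (least divisor, quotient); fuel bounds pInt n - d
theorem fdTrial_eq (n : Int) (hn : 2 ≤ n) :
    ∀ (m : Nat) (d : Int), (pInt n - d).toNat ≤ m → 2 ≤ d → d ≤ pInt n →
      (∀ k, 2 ≤ k → k < d → ¬ k ∣ n) →
      fdTrial n d = (pInt n, n / pInt n) := by
  intro m
  induction m with
  | zero =>
      intro d hm h2 hle hmin
      have hd : d = pInt n := by omega
      rw [fdTrial]
      by_cases hsq : n < d * d
      · have hdn : pInt n = n := pInt_eq_self_of_sq n hn (by omega) hmin hsq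
        rw [if_pos hsq, hdn, Int.ediv_self (by omega)]
      · rw [if_neg hsq,
            if_pos ((PySem.Int.mod_eq_zero_iff_dvd n d).mpr (by rw [hd]; exact pInt_dvd n hn)),
            hd, PySem.Int.floordiv_eq_ediv_of_pos (by omega)]
  | succ m ih =>
      intro d hm h2 hle hmin
      rw [fdTrial]
      by_cases hsq : n < d * d
      · rw [if_pos hsq, pInt_eq_self_of_sq n hn (by omega) hmin hsq, Int.ediv_self (by omega)]
      · rw [if_neg hsq]
        by_cases hmod : PySem.Int.mod n d = 0
        · have hdvd : d ∣ n := (PySem.Int.mod_eq_zero_iff_dvd n d).mp hmod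
          have : d = pInt n := le_antisymm hle (pInt_min n hn h2 hdvd)
          rw [if_pos hmod, this, PySem.Int.floordiv_eq_ediv_of_pos (by omega)]
        · rw [if_neg hmod]
          have hndvd : ¬ d ∣ n := fun h => hmod ((PySem.Int.mod_eq_zero_iff_dvd n d).mpr h)
          have hlt : d < pInt n := lt_of_le_of_ne hle (fun h => hndvd (h ▸ pInt_dvd n hn))
          exact ih (d + 1) (by omega) (by omega) (by omega)
            (fun k hk1 hk2 hk3 => by
              rcases (by omega : k < d ∨ k = d) with h | h
              · exact hmin k hk1 h hk3
              · exact hndvd (h ▸ hk3))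

-- the A-side second loop (with its fall-through (n, 1)) computes (least divisor, quotient)
theorem fdScan2_eq (n : Int) (hn : 2 ≤ n) (h2 : ¬ (2:Int) ∣ n) :
    ∀ (m : Nat) (dv : Int), (n - dv).toNat ≤ m → 5 ≤ dv → dv % 2 = 1 →
      (∀ k, 2 ≤ k → k < dv → ¬ k ∣ n) →
      (match fdScan2 n (PySem.List.pyRange dv n 4) with
       | some p => p
       | none => (n, 1)) = (pInt n, n / pInt n) := by
  intro m
  induction m with
  | zero =>
      intro dv hm h5 hodd hmin
      rw [pyRange_four_nil _ _ (by omega)]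
      simp only [fdScan2]
      rw [pInt_eq_self_of_le n hn hmin (by omega), Int.ediv_self (by omega)]
  | succ m ih =>
      intro dv hm h5 hodd hmin
      by_cases hcmp : dv < n
      case neg =>
        rw [pyRange_four_nil _ _ (by omega)]
        simp only [fdScan2]
        rw [pInt_eq_self_of_le n hn hmin (by omega), Int.ediv_self (by omega)]
      case pos =>
        rw [pyRange_four_cons _ _ hcmp]
        simp only [fdScan2]
        by_cases hsq : dv * dv > n
        · rw [if_pos hsq,
              pInt_eq_self_of_sq n hn (by omega) hmin (by omega), Int.ediv_self (by omega)]
        · rw [if_neg hsq]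
          by_cases hm1 : PySem.Int.mod n dv = 0
          · have hdvd : dv ∣ n := (PySem.Int.mod_eq_zero_iff_dvd n dv).mp hm1
            have : pInt n = dv := by
              have hle := pInt_min n hn (by omega) hdvd
              have h2' := pInt_two_le n hn
              by_contra hne
              exact hmin (pInt n) h2' (by omega) (pInt_dvd n hn)
            rw [if_pos hm1, this, PySem.Int.floordiv_eq_ediv_of_pos (by omega)]
          · rw [if_neg hm1]
            have hnd : ¬ dv ∣ n := fun h => hm1 ((PySem.Int.mod_eq_zero_iff_dvd n dv).mpr h)
            have hnd1 : ¬ (dv + 1) ∣ n := fun h =>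
              h2 (dvd_trans (by omega : (2:Int) ∣ dv + 1) h)
            by_cases hm2 : PySem.Int.mod n (dv + 2) = 0
            · have hdvd : (dv + 2) ∣ n := (PySem.Int.mod_eq_zero_iff_dvd n (dv + 2)).mp hm2
              have : pInt n = dv + 2 := by
                have hle := pInt_min n hn (by omega) hdvd
                have h2' := pInt_two_le n hn
                have hpd := pInt_dvd n hn
                by_contra hne
                rcases (by omega : pInt n < dv ∨ pInt n = dv ∨ pInt n = dv + 1) with h | h | h
                · exact hmin (pInt n) h2' h hpd
                · exact hnd (h ▸ hpd)
                · exact hnd1 (h ▸ hpd)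
              rw [if_pos hm2, this, PySem.Int.floordiv_eq_ediv_of_pos (by omega)]
            · rw [if_neg hm2]
              have hnd2 : ¬ (dv + 2) ∣ n := fun h =>
                hm2 ((PySem.Int.mod_eq_zero_iff_dvd n (dv + 2)).mpr h)
              have hnd3 : ¬ (dv + 3) ∣ n := fun h =>
                h2 (dvd_trans (by omega : (2:Int) ∣ dv + 3) h)
              exact ih (dv + 4) (by omega) (by omega) (by omega)
                (fun k hk1 hk2 hk3 => by
                  rcases (by omega : k < dv ∨ k = dv ∨ k = dv + 1 ∨ k = dv + 2 ∨ k = dv + 3)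
                    with h | h | h | h | h
                  · exact hmin k hk1 h hk3
                  · exact hnd (h ▸ hk3)
                  · exact hnd1 (h ▸ hk3)
                  · exact hnd2 (h ▸ hk3)
                  · exact hnd3 (h ▸ hk3))

-- ===== VERDICT (by name: the statement is the Claim_ definition above) =====
theorem first_divisors_spec : Claim_equal_first_divisors := by
  intro n _
  unfold Spec_first_divisors first_divisors first_divisors_alt
  by_cases hlt : n < 2
  · rw [if_pos hlt, if_pos hlt]
  · have hn : 2 ≤ n := by omega
    rw [if_neg hlt, if_neg hlt]
    have hB : fdTrial n 2 = (pInt n, n / pInt n) :=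
      fdTrial_eq n hn (pInt n - 2).toNat 2 (le_refl _) (le_refl _)
        (pInt_two_le n hn) (fun k hk1 hk2 _ => by omega)
    rw [hB, show PySem.List.pyRange 2 4 1 = [2, 3] from by decide]
    simp only [fdScan1]
    by_cases hd2 : PySem.Int.mod n 2 = 0
    · have hdvd : (2:Int) ∣ n := (PySem.Int.mod_eq_zero_iff_dvd n 2).mp hd2
      have hp : pInt n = 2 := le_antisymm (pInt_min n hn (by omega) hdvd) (pInt_two_le n hn)
      rw [if_pos hd2, hp, PySem.Int.floordiv_eq_ediv_of_pos (by omega)]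
    · rw [if_neg hd2]
      have h2 : ¬ (2:Int) ∣ n := fun h => hd2 ((PySem.Int.mod_eq_zero_iff_dvd n 2).mpr h)
      by_cases hd3 : PySem.Int.mod n 3 = 0
      · have hdvd : (3:Int) ∣ n := (PySem.Int.mod_eq_zero_iff_dvd n 3).mp hd3
        have hp : pInt n = 3 := by
          have hle := pInt_min n hn (by omega) hdvd
          have h2' := pInt_two_le n hn
          have hpd := pInt_dvd n hn
          rcases (by omega : pInt n = 2 ∨ pInt n = 3) with h | h
          · exact absurd (h ▸ hpd) h2
          · exact h
        rw [if_pos hd3, hp, PySem.Int.floordiv_eq_ediv_of_pos (by omega)]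
      · rw [if_neg hd3]
        have h3 : ¬ (3:Int) ∣ n := fun h => hd3 ((PySem.Int.mod_eq_zero_iff_dvd n 3).mpr h)
        exact fdScan2_eq n hn h2 (n - 5).toNat 5 (le_refl _) (le_refl _) (by decide)
          (fun k hk1 hk2 hk3 => by
            rcases (by omega : k = 2 ∨ k = 3 ∨ k = 4) with h | h | h
            · exact h2 (h ▸ hk3)
            · exact h3 (h ▸ hk3)
            · exact h2 (dvd_trans (by norm_num) (h ▸ hk3)))
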